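-- pv_equiv track=rewrite | github.com/ggm1207/programmers | python3/49993.py | check
-- ===== SOURCE A (Python) =====
-- def check(skill, skill_tree):
--     skill_idx = 0
--
--     for skill_ in skill_tree:
--         if skill_idx >= len(skill):
--             break
--
--         if skill_ in skill and skill_ != skill[skill_idx]:
--             return False
--
--         if skill_ == skill[skill_idx]:
--             skill_idx += 1
--
--     return True
-- ===== SOURCE B (Python) =====
-- def check(skill, skill_tree):
--     seq = [c for c in skill_tree if c in skill]
--     n = min(len(seq), len(skill))
--     return seq[:n] == list(skill[:n])
-- ===== Notes on version B (the rewrite author's own statement) =====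
-- stated objective: alternative
-- what changed: Replaces A's single interleaved scan with a manually advanced pointer into skill by a filter pass (keep only skill characters) followed by one truncated prefix comparison seq[:n] == skill[:n] with n = min(len(seq), len(skill)).
import Mathlib
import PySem

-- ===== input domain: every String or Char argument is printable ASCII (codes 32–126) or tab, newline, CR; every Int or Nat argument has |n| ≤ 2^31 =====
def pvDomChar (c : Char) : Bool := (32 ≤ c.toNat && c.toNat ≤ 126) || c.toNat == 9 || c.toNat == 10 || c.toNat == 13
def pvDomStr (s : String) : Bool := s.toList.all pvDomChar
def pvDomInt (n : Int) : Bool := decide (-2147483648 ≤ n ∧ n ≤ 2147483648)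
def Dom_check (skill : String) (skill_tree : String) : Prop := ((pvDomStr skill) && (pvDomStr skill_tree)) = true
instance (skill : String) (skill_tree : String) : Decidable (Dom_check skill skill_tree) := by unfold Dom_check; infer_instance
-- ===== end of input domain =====

-- ===== PORT A =====
-- B replaces A's interleaved pointer scan by a filter pass plus one truncated prefix comparison (objective: alternative decomposition).
def checkLoop (skill : List Char) (idx : Nat) : List Char → Bool
  | [] => true
  | c :: rest =>
    if skill.length ≤ idx then true
    else if skill.contains c && c != skill.getD idx ' ' then false
    else if c == skill.getD idx ' ' then checkLoop skill (idx + 1) rest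
    else checkLoop skill idx rest

def check (skill : String) (skill_tree : String) : Bool :=
  checkLoop skill.toList 0 skill_tree.toList

-- ===== PORT B =====
def check_alt (skill : String) (skill_tree : String) : Bool :=
  let seq := skill_tree.toList.filter (fun c => skill.toList.contains c)
  let n := min seq.length skill.toList.length
  seq.take n == skill.toList.take n

-- ===== PRECONDITION & SPEC =====
def Spec_check (skill : String) (skill_tree : String) (out : Bool) : Prop := out = check_alt skill skill_tree
instance (skill : String) (skill_tree : String) (out : Bool) : Decidable (Spec_check skill skill_tree out) := by unfold Spec_check; infer_instance

-- ===== CLAIM (what is proved, stated in full; the proofs are below) =====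
def Claim_equal_check : Prop := ∀ (skill : String) (skill_tree : String), Dom_check skill skill_tree → Spec_check skill skill_tree (check skill skill_tree)

-- ===== LEMMAS AND PROOFS =====

theorem checkLoop_eq (tree skill : List Char) (idx : Nat) :
    checkLoop skill idx tree =
      (let seq := tree.filter (fun c => skill.contains c)
       let n := min seq.length (skill.length - idx)
       seq.take n == (skill.drop idx).take n) := by
  induction tree generalizing idx with
  | nil => simp [checkLoop]
  | cons c rest ih =>
    by_cases hle : skill.length ≤ idx
    · have hz : skill.length - idx = 0 := by omega
      simp [checkLoop, hle, hz]
    · have hidx : idx < skill.length := by omega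
      have hdrop : skill.drop idx = skill[idx] :: skill.drop (idx + 1) := by
        exact (List.getElem_cons_drop hidx).symm
      have hget? : skill[idx]? = some skill[idx] := List.getElem?_eq_getElem hidx
      have hgetD : skill.getD idx ' ' = skill[idx] := by simp [List.getD, hget?, Option.getD_some]
      by_cases hmem : c ∈ skill
      · have hfc : List.filter (fun c => skill.contains c) (c :: rest)
            = c :: List.filter (fun c => skill.contains c) rest := by
          simp [hmem]
        by_cases hne : c = skill[idx]
        · have h1 : (skill.contains c && c != skill.getD idx ' ') = false := by
            rw [hgetD]; simp [hne]
          have h2 : (c == skill.getD idx ' ') = true := by rw [hgetD]; simp [hne]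
          simp only [checkLoop, if_neg hle, h1, Bool.false_eq_true, if_false, h2, if_true, ih]
          have hS : min ((List.filter (fun c => skill.contains c) rest).length + 1)
              (skill.length - idx)
              = min ((List.filter (fun c => skill.contains c) rest).length)
                (skill.length - (idx + 1)) + 1 := by omega
          rw [hfc, List.length_cons, hS, List.take_succ_cons, hdrop, List.take_succ_cons]
          simp [List.cons_beq_cons, hne]
        · have h1 : (skill.contains c && c != skill.getD idx ' ') = true := by
            rw [hgetD]; simp [hne, hmem]
          simp only [checkLoop, if_neg hle, h1, if_true]
          have hS : min ((List.filter (fun c => skill.contains c) rest).length + 1)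
              (skill.length - idx)
              = min ((List.filter (fun c => skill.contains c) rest).length)
                (skill.length - idx - 1) + 1 := by omega
          rw [hfc, List.length_cons, hS, List.take_succ_cons, hdrop, List.take_succ_cons]
          simp [List.cons_beq_cons, hne]
      · have h1 : (skill.contains c && c != skill.getD idx ' ') = false := by
          simp [hmem]
        have hne : c ≠ skill[idx] := fun h => hmem (h ▸ skill.getElem_mem hidx)
        have h2 : (c == skill.getD idx ' ') = false := by rw [hgetD]; simp [hne]
        have hfc : List.filter (fun c => skill.contains c) (c :: rest)
            = List.filter (fun c => skill.contains c) rest := by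
          simp [hmem]
        simp only [checkLoop, if_neg hle, h1, Bool.false_eq_true, if_false, h2, ih]
        rw [hfc]

-- ===== VERDICT (by name: the statement is the Claim_ definition above) =====
theorem check_spec : Claim_equal_check := by
  intro skill skill_tree _
  unfold Spec_check check check_alt
  simpa using checkLoop_eq skill_tree.toList skill.toList 0
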